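-- pv_equiv track=rewrite | github.com/98sean98/random_programs | k-algo.py | createCluster
-- ===== SOURCE A (Python) =====
-- def createCluster(m1, m2, data):
--     newk1 = []
--     newk2 = []
--     for e in data:
--         d1 = abs(e - m1)
--         d2 = abs(e - m2)
--         if d1 < d2:
--             newk1.append(e)
--         elif d1 > d2:
--             newk2.append(e)
--         else:
--             newk1.append(e)
--             newk2.append(e)
--     return newk1, newk2
-- ===== SOURCE B (Python) =====
-- def createCluster(m1, m2, data):
--     newk1 = [e for e in data if abs(e - m1) <= abs(e - m2)]
--     newk2 = [e for e in data if abs(e - m1) >= abs(e - m2)]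
--     return newk1, newk2
-- ===== Notes on version B (the rewrite author's own statement) =====
-- stated objective: simpler
-- what changed: Replaces the single loop with three-way branching over two mutable accumulators by two independent filter passes; <=/>= thresholds reproduce the tie case (equal distances go to both lists).
import Mathlib
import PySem

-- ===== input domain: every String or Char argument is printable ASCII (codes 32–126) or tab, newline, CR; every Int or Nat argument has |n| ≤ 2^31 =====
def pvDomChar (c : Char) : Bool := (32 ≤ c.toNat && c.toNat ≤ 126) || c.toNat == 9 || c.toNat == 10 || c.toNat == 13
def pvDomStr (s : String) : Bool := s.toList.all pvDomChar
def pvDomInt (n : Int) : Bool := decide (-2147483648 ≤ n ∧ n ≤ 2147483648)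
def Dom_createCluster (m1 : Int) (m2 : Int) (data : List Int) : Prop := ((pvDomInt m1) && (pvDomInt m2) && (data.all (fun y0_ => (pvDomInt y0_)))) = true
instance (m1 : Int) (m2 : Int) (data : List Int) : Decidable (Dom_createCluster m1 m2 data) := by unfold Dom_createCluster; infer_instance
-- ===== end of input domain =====

-- B replaces A's single loop with two mutable accumulators by two independent filter passes (simpler decomposition; same O(n) cost).

-- ===== PORT A =====
-- single pass, two accumulators, three-way branch, appending at the end (hence the ++ [e])
def createCluster (m1 : Int) (m2 : Int) (data : List Int) : List Int × List Int :=
  data.foldl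
    (fun acc e =>
      let d1 := (e - m1).natAbs
      let d2 := (e - m2).natAbs
      if d1 < d2 then (acc.1 ++ [e], acc.2)
      else if d1 > d2 then (acc.1, acc.2 ++ [e])
      else (acc.1 ++ [e], acc.2 ++ [e]))
    ([], [])

-- ===== PORT B =====
def createCluster_alt (m1 : Int) (m2 : Int) (data : List Int) : List Int × List Int :=
  (data.filter (fun e => (e - m1).natAbs ≤ (e - m2).natAbs),
   data.filter (fun e => (e - m1).natAbs ≥ (e - m2).natAbs))

-- ===== PRECONDITION & SPEC =====
def Spec_createCluster (m1 : Int) (m2 : Int) (data : List Int) (out : List Int × List Int) : Prop := out = createCluster_alt m1 m2 data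
instance (m1 : Int) (m2 : Int) (data : List Int) (out : List Int × List Int) : Decidable (Spec_createCluster m1 m2 data out) := by unfold Spec_createCluster; infer_instance

-- ===== CLAIM (what is proved, stated in full; the proofs are below) =====
def Claim_equal_createCluster : Prop := ∀ (m1 : Int) (m2 : Int) (data : List Int), Dom_createCluster m1 m2 data → Spec_createCluster m1 m2 data (createCluster m1 m2 data)

-- ===== LEMMAS AND PROOFS =====

-- the fold with any starting accumulators returns the accumulators extended by the filtered rest
theorem createCluster_fold_general (m1 m2 : Int) (data : List Int) (a b : List Int) :
    data.foldl
      (fun acc e =>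
        let d1 := (e - m1).natAbs
        let d2 := (e - m2).natAbs
        if d1 < d2 then (acc.1 ++ [e], acc.2)
        else if d1 > d2 then (acc.1, acc.2 ++ [e])
        else (acc.1 ++ [e], acc.2 ++ [e]))
      (a, b)
    = (a ++ data.filter (fun e => (e - m1).natAbs ≤ (e - m2).natAbs),
       b ++ data.filter (fun e => (e - m1).natAbs ≥ (e - m2).natAbs)) := by
  induction data generalizing a b with
  | nil => simp
  | cons e rest ih =>
    simp only [List.foldl_cons, List.filter_cons]
    by_cases h1 : (e - m1).natAbs < (e - m2).natAbs
    · have hle : ((e - m1).natAbs ≤ (e - m2).natAbs) = True := by simp [Nat.le_of_lt h1]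
      have hge : ((e - m1).natAbs ≥ (e - m2).natAbs) = False := by simp; omega
      simp only [h1, if_true, ih, decide_eq_true_eq]
      simp [Nat.le_of_lt h1, show ¬ ((e - m2).natAbs ≤ (e - m1).natAbs) by omega]
    · by_cases h2 : (e - m1).natAbs > (e - m2).natAbs
      · simp only [h1, if_false, h2, if_true, ih, decide_eq_true_eq]
        simp [show ¬ ((e - m1).natAbs ≤ (e - m2).natAbs) by omega, Nat.le_of_lt h2]
      · have heq : (e - m1).natAbs = (e - m2).natAbs := by omega
        simp only [h1, if_false, h2, ih, decide_eq_true_eq]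
        simp [heq]

-- ===== VERDICT (by name: the statement is the Claim_ definition above) =====
theorem createCluster_spec : Claim_equal_createCluster := by
  intro m1 m2 data _
  unfold Spec_createCluster createCluster createCluster_alt
  simpa using createCluster_fold_general m1 m2 data [] []
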